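-- pv_equiv track=rewrite | github.com/CompOmics/oui-discovery | oui-discovery-vv/tpp_preprocess.py | classify_protein_tpp
-- ===== SOURCE A (Python) =====
-- def classify_protein_tpp(row):
--     if any('decoy_' in i for i in row):
--         return 'decoy'
--     ##row=[p.split("|")[1] for p in row]
--     if any('CONTAMINANT' in x or 'contaminant' in x for x in row):
--         return 'Contam'
--     elif all(x.startswith('II_') or x.startswith('IP_') for x in row):
--         return 'NonCanon'
--         # Ensembl is canonical
--     else:
--         return 'Canon'
-- ===== SOURCE B (Python) =====
-- def classify_protein_tpp(row):
--     has_contam = False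
--     all_noncanon = True
--     for i in row:
--         if 'decoy_' in i:
--             return 'decoy'
--         if 'CONTAMINANT' in i or 'contaminant' in i:
--             has_contam = True
--         if not (i.startswith('II_') or i.startswith('IP_')):
--             all_noncanon = False
--     if has_contam:
--         return 'Contam'
--     if all_noncanon:
--         return 'NonCanon'
--     return 'Canon'
-- ===== Notes on version B (the rewrite author's own statement) =====
-- stated objective: alternative
-- what changed: Replaced A's three separate scans (any/any/all) by one single pass over row that returns 'decoy' on first hit and otherwise accumulates a has_contam and an all_noncanon flag, deciding the result after the loop.
import Mathlib
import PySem

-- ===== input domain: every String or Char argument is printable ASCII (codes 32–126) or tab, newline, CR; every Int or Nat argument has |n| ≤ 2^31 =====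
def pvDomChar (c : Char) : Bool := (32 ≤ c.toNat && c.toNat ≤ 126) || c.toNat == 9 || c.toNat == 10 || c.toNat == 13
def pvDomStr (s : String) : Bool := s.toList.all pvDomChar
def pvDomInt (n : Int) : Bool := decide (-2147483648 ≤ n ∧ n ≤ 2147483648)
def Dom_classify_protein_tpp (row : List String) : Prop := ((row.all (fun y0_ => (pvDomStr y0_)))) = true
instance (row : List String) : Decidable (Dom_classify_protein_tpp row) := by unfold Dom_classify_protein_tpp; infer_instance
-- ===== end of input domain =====

-- B replaces A's three separate scans by one single-pass loop accumulating two flags (alternative decomposition, same cost).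


-- ===== PORT A =====
def classify_protein_tpp (row : List String) : String :=
  if row.any (fun i => PySem.Str.isIn "decoy_" i) then "decoy"
  else if row.any (fun x => PySem.Str.isIn "CONTAMINANT" x || PySem.Str.isIn "contaminant" x) then "Contam"
  else if row.all (fun x => PySem.Str.startswith x "II_" || PySem.Str.startswith x "IP_") then "NonCanon"
  else "Canon"

-- ===== PORT B =====
-- single pass accumulating has_contam / all_noncanon flags, early return on 'decoy_'
def classifyGo : List String → Bool → Bool → String
  | [], hasContam, allNonCanon =>
      if hasContam then "Contam" else if allNonCanon then "NonCanon" else "Canon"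
  | i :: rest, hasContam, allNonCanon =>
      if PySem.Str.isIn "decoy_" i then "decoy"
      else classifyGo rest
        (hasContam || (PySem.Str.isIn "CONTAMINANT" i || PySem.Str.isIn "contaminant" i))
        (allNonCanon && (PySem.Str.startswith i "II_" || PySem.Str.startswith i "IP_"))

def classify_protein_tpp_alt (row : List String) : String :=
  classifyGo row false true

-- ===== PRECONDITION & SPEC =====
def Spec_classify_protein_tpp (row : List String) (out : String) : Prop := out = classify_protein_tpp_alt row
instance (row : List String) (out : String) : Decidable (Spec_classify_protein_tpp row out) := by unfold Spec_classify_protein_tpp; infer_instance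

-- ===== CLAIM (what is proved, stated in full; the proofs are below) =====
def Claim_equal_classify_protein_tpp : Prop := ∀ (row : List String), Dom_classify_protein_tpp row → Spec_classify_protein_tpp row (classify_protein_tpp row)

-- ===== LEMMAS AND PROOFS =====

-- ===== VERDICT (by name: the statement is the Claim_ definition above) =====
lemma classifyGo_eq (row : List String) : ∀ hc an : Bool,
    classifyGo row hc an =
      if row.any (fun i => PySem.Str.isIn "decoy_" i) then "decoy"
      else if hc || row.any (fun x => PySem.Str.isIn "CONTAMINANT" x || PySem.Str.isIn "contaminant" x) then "Contam"
      else if an && row.all (fun x => PySem.Str.startswith x "II_" || PySem.Str.startswith x "IP_") then "NonCanon"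
      else "Canon" := by
  induction row with
  | nil => intro hc an; cases hc <;> cases an <;> rfl
  | cons i rest ih =>
      intro hc an
      simp only [classifyGo, List.any_cons, List.all_cons]
      cases hd : PySem.Str.isIn "decoy_" i with
      | true => simp only [Bool.true_or]; rfl
      | false =>
          simp only [Bool.false_or, Bool.false_eq_true, if_false, ih,
            Bool.or_assoc, Bool.and_assoc]
          exact if_congr Iff.rfl rfl (if_congr Iff.rfl rfl (if_congr Iff.rfl rfl rfl))

theorem classify_protein_tpp_spec : Claim_equal_classify_protein_tpp := by
  intro row _
  unfold Spec_classify_protein_tpp classify_protein_tpp classify_protein_tpp_alt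
  rw [classifyGo_eq]
  simp
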